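-- pv_equiv track=rewrite | github.com/kinfe19/Kattis-Questions-and-Answers | antiarithmetic.py | check
-- ===== SOURCE A (Python) =====
-- def check(l, n):
--     p = [0 for i in range(n)]
--     for i in range(n):
--     	p[l[i]] = i
--     for i in range(n-2):
--         for j in range(i+1, n):
--         	k = 2*j - i
--         	if k >= n:
--         		break
--         	if (p[i] > p[j] and p[j] > p[k]) or (p[k]>p[j] and p[j]>p[i]):
--         		return False
--     return True
-- ===== SOURCE B (Python) =====
-- def check(l, n):
--     p = [0 for i in range(n)]
--     for i in range(n):
--         p[l[i]] = i
--     for a in range(n):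
--         for c in range(a + 1, n):
--             s = l[a] + l[c]
--             if s % 2 == 0 and a < p[s // 2] < c:
--                 return False
--     return True
-- ===== Notes on version B (the rewrite author's own statement) =====
-- stated objective: alternative
-- what changed: A scans value pairs (i,j) and tests full positional monotonicity of the value triple (i,j,2j-i) with an early break; B scans position pairs (a,c) and, when l[a]+l[c] is even, does a single midpoint lookup a < p[(l[a]+l[c])//2] < c.
-- outside the precondition, e.g. on check([1, 1, 0], 3): A returns False, B returns True; on check([-3, 1, 2], 3): A returns False, B returns True
import Mathlib
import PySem

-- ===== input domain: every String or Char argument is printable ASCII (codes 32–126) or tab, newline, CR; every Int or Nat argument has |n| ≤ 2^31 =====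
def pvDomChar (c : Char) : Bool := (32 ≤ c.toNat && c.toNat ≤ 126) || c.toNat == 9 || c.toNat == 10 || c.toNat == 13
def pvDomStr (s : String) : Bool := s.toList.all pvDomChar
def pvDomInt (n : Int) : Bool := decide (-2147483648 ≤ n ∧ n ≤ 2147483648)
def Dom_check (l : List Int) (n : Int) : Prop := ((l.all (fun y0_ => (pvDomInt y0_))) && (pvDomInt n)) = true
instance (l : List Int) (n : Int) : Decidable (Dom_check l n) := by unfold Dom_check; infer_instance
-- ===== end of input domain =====

-- B replaces A's scan over value pairs (i,j) (testing positional monotonicity of the value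
-- triple (i, j, 2j-i) with an early break) by a scan over position pairs (a, c) with a single
-- midpoint position lookup; objective: alternative (same asymptotic cost).

-- ===== PORT A =====
-- 'p = [0 for i in range(n)]; for i in range(n): p[l[i]] = i'  (this prefix is shared verbatim
-- by A and by B, so both ports call the same helper)
def pvBuildP (l : List Int) (n : Int) : List Int :=
  (PySem.List.pyRange 0 n 1).foldl
    (fun p i => PySem.List.pySetD p (PySem.List.pyGetD l i 0) i)
    ((PySem.List.pyRange 0 n 1).map (fun _ => (0 : Int)))

-- inner 'for j in range(i+1, n): k = 2*j-i; if k >= n: break; if …: return False'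
def pvInnerA (p : List Int) (n i j : Int) : Bool :=
  if _h : j < n then
    if n ≤ 2*j - i then false
    else if (decide (PySem.List.pyGetD p i 0 > PySem.List.pyGetD p j 0) &&
              decide (PySem.List.pyGetD p j 0 > PySem.List.pyGetD p (2*j - i) 0)) ||
            (decide (PySem.List.pyGetD p (2*j - i) 0 > PySem.List.pyGetD p j 0) &&
              decide (PySem.List.pyGetD p j 0 > PySem.List.pyGetD p i 0)) then true
    else pvInnerA p n i (j+1)
  else false
termination_by (n - j).toNat
decreasing_by omega

def check (l : List Int) (n : Int) : Bool :=
  let p := pvBuildP l n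
  !((PySem.List.pyRange 0 (n-2) 1).any (fun i => pvInnerA p n i (i+1)))

-- ===== PORT B =====
def check_alt (l : List Int) (n : Int) : Bool :=
  let p := pvBuildP l n
  !((PySem.List.pyRange 0 n 1).any (fun a =>
      (PySem.List.pyRange (a+1) n 1).any (fun c =>
        let s := PySem.List.pyGetD l a 0 + PySem.List.pyGetD l c 0
        (PySem.Int.mod s 2 == 0) &&
          decide (a < PySem.List.pyGetD p (PySem.Int.floordiv s 2) 0) &&
          decide (PySem.List.pyGetD p (PySem.Int.floordiv s 2) 0 < c))))

-- ===== PRECONDITION & SPEC =====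
-- Pre_ is the task's natural domain: either n ≤ 0 (both loops are empty) or the n entries the
-- function reads form a permutation of 0..n-1. Outside it A's returned value (when it returns at
-- all) is an accident of Python's negative-index wraparound and of last-write-wins duplicate
-- overwrites in p.
def Pre_check (l : List Int) (n : Int) : Prop :=
  n ≤ 0 ∨ (n ≤ (l.length : Int) ∧ ∀ v ∈ List.range n.toNat, ((v : Int) ∈ l.take n.toNat))
instance (l : List Int) (n : Int) : Decidable (Pre_check l n) := by unfold Pre_check; infer_instance
def pvWitness_check : List Int × Int := ([2, 0, 1], 3)

def Spec_check (l : List Int) (n : Int) (out : Bool) : Prop := out = check_alt l n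
instance (l : List Int) (n : Int) (out : Bool) : Decidable (Spec_check l n out) := by unfold Spec_check; infer_instance

-- ===== CLAIM (what is proved, stated in full; the proofs are below) =====
def Claim_equal_check : Prop := ∀ (l : List Int) (n : Int), Dom_check l n → Pre_check l n → Spec_check l n (check l n)

-- ===== LEMMAS AND PROOFS =====

-- proof-side abbreviation for Python's p[v] (indices we use are always in range)
def pvAt (p : List Int) (i : Int) : Int := PySem.List.pyGetD p i 0

-- A's violation condition on the value triple (i, j, 2j-i)
def pvCondA (p : List Int) (i j : Int) : Prop :=
  (pvAt p i > pvAt p j ∧ pvAt p j > pvAt p (2*j - i)) ∨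
  (pvAt p (2*j - i) > pvAt p j ∧ pvAt p j > pvAt p i)

lemma pvRange_zero_eq (n : Int) :
    PySem.List.pyRange 0 n 1 = (List.range n.toNat).map (fun (k : Nat) => (k : Int)) := by
  rw [PySem.List.pyRange_one]
  simp only [Int.sub_zero, zero_add]

lemma pvBuildP_eq (l : List Int) (n : Int) :
    pvBuildP l n = (List.range n.toNat).foldl
      (fun p (t : Nat) => PySem.List.pySetD p (l.getD t 0) (t : Int))
      (List.replicate n.toNat (0 : Int)) := by
  unfold pvBuildP
  rw [pvRange_zero_eq, List.foldl_map]
  simp only [PySem.List.pyGetD_natCast, List.map_const', List.length_map, List.length_range]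

lemma pvFold_invariant (l : List Int) (n : Int)
    (hrange : ∀ x ∈ l, 0 ≤ x ∧ x < n) (hnodup : l.Nodup) (hlen : l.length = n.toNat) :
    ∀ m : Nat, m ≤ l.length →
      ((List.range m).foldl (fun p (t : Nat) => PySem.List.pySetD p (l.getD t 0) (t : Int))
          (List.replicate n.toNat (0 : Int))).length = n.toNat ∧
      ∀ t : Nat, t < m →
        pvAt ((List.range m).foldl (fun p (t : Nat) => PySem.List.pySetD p (l.getD t 0) (t : Int))
          (List.replicate n.toNat (0 : Int))) (l.getD t 0) = (t : Int) := by
  intro m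
  induction m with
  | zero => intro _; refine ⟨by simp, by omega⟩
  | succ m ih =>
    intro hm
    have hm' : m ≤ l.length := by omega
    obtain ⟨ihlen, ihget⟩ := ih hm'
    rw [List.range_succ, List.foldl_append]
    set q := (List.range m).foldl (fun p (t : Nat) => PySem.List.pySetD p (l.getD t 0) (t : Int))
      (List.replicate n.toNat (0 : Int)) with hq
    have hmlt : m < l.length := by omega
    have hvm : l.getD m 0 = l[m] := List.getD_eq_getElem l 0 hmlt
    have hvm_mem : l[m] ∈ l := List.getElem_mem hmlt
    have hvmb := hrange _ hvm_mem
    constructor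
    · simp [PySem.List.length_pySetD, ihlen]
    · intro t ht
      simp only [List.foldl_cons, List.foldl_nil]
      by_cases htm : t = m
      · subst htm
        rw [PySem.List.pySetD_of_nonneg _ _ (by rw [hvm]; exact hvmb.1)]
        unfold pvAt
        rw [PySem.List.pyGetD_eq_getElem _ _ (by rw [hvm]; exact hvmb.1)
          (by rw [List.length_set, ihlen, hvm]; omega)]
        rw [List.getElem_set_self]
      · have htl : t < l.length := by omega
        have hvt : l.getD t 0 = l[t] := List.getD_eq_getElem l 0 htl
        have hvtb := hrange _ (List.getElem_mem htl)
        have hne : l[t] ≠ l[m] := by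
          intro h
          exact htm (List.Nodup.getElem_inj_iff hnodup |>.mp h)
        rw [PySem.List.pySetD_of_nonneg _ _ (by rw [hvm]; exact hvmb.1)]
        unfold pvAt
        rw [PySem.List.pyGetD_eq_getElem _ _ (by rw [hvt]; exact hvtb.1)
          (by rw [List.length_set, ihlen, hvt]; omega)]
        rw [List.getElem_set_ne (by rw [hvm, hvt]; omega)]
        have := ihget t (by omega)
        unfold pvAt at this
        rw [PySem.List.pyGetD_eq_getElem _ _ (by rw [hvt]; exact hvtb.1)
          (by rw [ihlen, hvt]; omega)] at this
        exact this

-- the permutation facts extracted from Pre_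
lemma pvPerm_facts (l : List Int) (n : Int)
    (hpre : n = (l.length : Int) ∧ ∀ v ∈ List.range l.length, ((v : Int) ∈ l)) :
    (∀ x ∈ l, 0 ≤ x ∧ x < n) ∧ l.Nodup ∧ l.length = n.toNat := by
  obtain ⟨hn, hall⟩ := hpre
  have hn0 : 0 ≤ n := by rw [hn]; exact_mod_cast Int.natCast_nonneg l.length
  have hlen : l.length = n.toNat := by omega
  have hsub : ((List.range l.length).map (fun (k : Nat) => (k : Int))) ⊆ l := by
    intro x hx
    simp only [List.mem_map, List.mem_range] at hx
    obtain ⟨v, hv, rfl⟩ := hx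
    exact hall v (List.mem_range.mpr hv)
  have hnodup_r : ((List.range l.length).map (fun (k : Nat) => (k : Int))).Nodup :=
    List.Nodup.map (fun a b h => by exact_mod_cast h) (List.nodup_range)
  have hsp : ((List.range l.length).map (fun (k : Nat) => (k : Int))).Subperm l :=
    List.subperm_of_subset hnodup_r hsub
  have hperm : ((List.range l.length).map (fun (k : Nat) => (k : Int))).Perm l :=
    hsp.perm_of_length_le (by simp)
  refine ⟨?_, hperm.nodup_iff.mp hnodup_r, hlen⟩
  intro x hx
  have := hperm.mem_iff.mpr hx
  simp only [List.mem_map, List.mem_range] at this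
  obtain ⟨v, hv, rfl⟩ := this
  constructor
  · exact_mod_cast Int.natCast_nonneg v
  · rw [hn]; exact_mod_cast hv

lemma pvP_facts (l : List Int) (n : Int)
    (hpre : n = (l.length : Int) ∧ ∀ v ∈ List.range l.length, ((v : Int) ∈ l)) :
    (∀ a : Int, 0 ≤ a → a < n → (0 ≤ pvAt l a ∧ pvAt l a < n) ∧ pvAt (pvBuildP l n) (pvAt l a) = a) ∧
    (∀ v : Int, 0 ≤ v → v < n → 0 ≤ pvAt (pvBuildP l n) v ∧ pvAt (pvBuildP l n) v < n ∧
        pvAt l (pvAt (pvBuildP l n) v) = v) := by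
  obtain ⟨hrange, hnodup, hlen⟩ := pvPerm_facts l n hpre
  obtain ⟨hplen, hpget⟩ := pvFold_invariant l n hrange hnodup hlen l.length (le_refl _)
  rw [hlen] at hpget
  have hget : ∀ t : Nat, t < n.toNat → pvAt (pvBuildP l n) (l.getD t 0) = (t : Int) := by
    intro t ht
    rw [pvBuildP_eq]
    exact hpget t ht
  have hAtL : ∀ a : Int, 0 ≤ a → a < n → pvAt l a = l.getD a.toNat 0 := by
    intro a h0 h1
    unfold pvAt
    rw [PySem.List.pyGetD_eq_getElem _ _ h0 (by omega)]
    exact (List.getD_eq_getElem l 0 (by omega)).symm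
  constructor
  · intro a h0 h1
    have hal : a.toNat < l.length := by omega
    have hmem : l[a.toNat] ∈ l := List.getElem_mem hal
    have hb := hrange _ hmem
    have hL : pvAt l a = l[a.toNat] := by
      rw [hAtL a h0 h1]; exact List.getD_eq_getElem l 0 hal
    refine ⟨by rw [hL]; exact hb, ?_⟩
    have := hget a.toNat (by omega)
    rw [List.getD_eq_getElem l 0 hal] at this
    rw [hL, this]; omega
  · intro v h0 h1
    obtain ⟨hn, hall⟩ := hpre
    have hvmem : ((v.toNat : Nat) : Int) ∈ l := hall v.toNat (List.mem_range.mpr (by omega))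
    obtain ⟨t, hT⟩ := List.mem_iff_getElem.mp hvmem
    obtain ⟨htl, hTv⟩ := hT
    have hgd : l.getD t 0 = v := by
      rw [List.getD_eq_getElem l 0 htl, hTv]; omega
    have := hget t (by omega)
    rw [hgd] at this
    rw [this]
    refine ⟨by omega, by omega, ?_⟩
    rw [hAtL (t : Int) (by omega) (by omega)]
    simp only [Int.toNat_natCast]
    rw [List.getD_eq_getElem l 0 htl, hTv]; omega

-- characterisation of the inner loop of A (the break is absorbed into the 2j-i < n bound)
lemma pvInnerA_iff (p : List Int) (n i : Int) (j : Int) :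
    pvInnerA p n i j = true ↔
      ∃ j' : Int, j ≤ j' ∧ j' < n ∧ 2*j' - i < n ∧ pvCondA p i j' := by
  have main : ∀ fuel : Nat, ∀ j : Int, (n - j).toNat ≤ fuel →
      (pvInnerA p n i j = true ↔
        ∃ j' : Int, j ≤ j' ∧ j' < n ∧ 2*j' - i < n ∧ pvCondA p i j') := by
    intro fuel
    induction fuel with
    | zero =>
      intro j hf
      rw [pvInnerA]
      have : ¬ j < n := by omega
      simp only [this, dite_false]
      constructor
      · intro h; exact absurd h (by simp)
      · rintro ⟨j', h1, h2, _⟩; omega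
    | succ fuel ih =>
      intro j hf
      rw [pvInnerA]
      by_cases hjn : j < n
      · simp only [hjn, dite_true]
        by_cases hbrk : n ≤ 2*j - i
        · simp only [hbrk, if_true]
          constructor
          · intro h; exact absurd h (by simp)
          · rintro ⟨j', h1, h2, h3, _⟩; omega
        · simp only [hbrk, if_false]
          by_cases hcond : pvCondA p i j
          · have : ((decide (pvAt p i > pvAt p j) && decide (pvAt p j > pvAt p (2*j - i))) ||
                (decide (pvAt p (2*j - i) > pvAt p j) && decide (pvAt p j > pvAt p i))) = true := by
              unfold pvCondA at hcond
              rcases hcond with ⟨h1, h2⟩ | ⟨h1, h2⟩ <;> simp [h1, h2]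
            unfold pvAt at this
            rw [if_pos this]
            exact ⟨fun _ => ⟨j, le_refl _, hjn, by omega, hcond⟩, fun _ => rfl⟩
          · have : ((decide (pvAt p i > pvAt p j) && decide (pvAt p j > pvAt p (2*j - i))) ||
                (decide (pvAt p (2*j - i) > pvAt p j) && decide (pvAt p j > pvAt p i))) = false := by
              unfold pvCondA at hcond
              push Not at hcond
              by_cases h1 : pvAt p i > pvAt p j <;> by_cases h2 : pvAt p (2*j - i) > pvAt p j <;>
                simp [h1, h2] <;> omega
            unfold pvAt at this
            rw [if_neg (by simp [this])]
            rw [ih (j+1) (by omega)]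
            constructor
            · rintro ⟨j', h1, h2, h3, h4⟩; exact ⟨j', by omega, h2, h3, h4⟩
            · rintro ⟨j', h1, h2, h3, h4⟩
              refine ⟨j', ?_, h2, h3, h4⟩
              rcases eq_or_lt_of_le h1 with rfl | h
              · exact absurd h4 hcond
              · omega
      · simp only [hjn, dite_false]
        constructor
        · intro h; exact absurd h (by simp)
        · rintro ⟨j', h1, h2, _⟩; omega
  exact main (n - j).toNat j (le_refl _)

-- characterisation of A
lemma pvCheckA_false_iff (l : List Int) (n : Int) :
    check l n = false ↔
      ∃ i j : Int, 0 ≤ i ∧ i + 1 ≤ j ∧ j < n ∧ 2*j - i < n ∧ pvCondA (pvBuildP l n) i j := by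
  unfold check
  simp only [Bool.not_eq_false', List.any_eq_true]
  constructor
  · rintro ⟨i, hmem, hinner⟩
    rw [PySem.List.mem_pyRange_one] at hmem
    obtain ⟨j, h1, h2, h3, h4⟩ := (pvInnerA_iff _ n i (i+1)).mp hinner
    exact ⟨i, j, hmem.1, h1, h2, h3, h4⟩
  · rintro ⟨i, j, h0, h1, h2, h3, h4⟩
    refine ⟨i, PySem.List.mem_pyRange_one.mpr ⟨h0, by omega⟩, ?_⟩
    exact (pvInnerA_iff _ n i (i+1)).mpr ⟨j, h1, h2, h3, h4⟩

-- characterisation of B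
lemma pvCheckAlt_false_iff (l : List Int) (n : Int) :
    check_alt l n = false ↔
      ∃ a c : Int, 0 ≤ a ∧ a + 1 ≤ c ∧ c < n ∧
        PySem.Int.mod (pvAt l a + pvAt l c) 2 = 0 ∧
        a < pvAt (pvBuildP l n) (PySem.Int.floordiv (pvAt l a + pvAt l c) 2) ∧
        pvAt (pvBuildP l n) (PySem.Int.floordiv (pvAt l a + pvAt l c) 2) < c := by
  unfold check_alt pvAt
  simp only [Bool.not_eq_false', List.any_eq_true, Bool.and_eq_true, decide_eq_true_eq,
    beq_iff_eq, PySem.List.mem_pyRange_one]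
  constructor
  · rintro ⟨a, ⟨ha0, _⟩, c, ⟨hc1, hc2⟩, ⟨hm, h1⟩, h2⟩
    exact ⟨a, c, ha0, hc1, hc2, hm, h1, h2⟩
  · rintro ⟨a, c, h0, h1, h2, h3, h4, h5⟩
    exact ⟨a, ⟨h0, by omega⟩, c, ⟨h1, h2⟩, ⟨h3, h4⟩, h5⟩

-- the bridge between the two existentials, using the permutation facts
lemma pvBridge (l : List Int) (n : Int)
    (hpre : n = (l.length : Int) ∧ ∀ v ∈ List.range l.length, ((v : Int) ∈ l)) :
    ((∃ i j : Int, 0 ≤ i ∧ i + 1 ≤ j ∧ j < n ∧ 2*j - i < n ∧ pvCondA (pvBuildP l n) i j) ↔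
     (∃ a c : Int, 0 ≤ a ∧ a + 1 ≤ c ∧ c < n ∧
        PySem.Int.mod (pvAt l a + pvAt l c) 2 = 0 ∧
        a < pvAt (pvBuildP l n) (PySem.Int.floordiv (pvAt l a + pvAt l c) 2) ∧
        pvAt (pvBuildP l n) (PySem.Int.floordiv (pvAt l a + pvAt l c) 2) < c)) := by
  obtain ⟨hF2, hF1⟩ := pvP_facts l n hpre
  constructor
  · rintro ⟨i, j, h0, h1, h2, h3, hcond⟩
    have hk0 : (0:Int) ≤ 2*j - i := by omega
    obtain ⟨hpi0, hpi1, hlpi⟩ := hF1 i h0 (by omega)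
    obtain ⟨hpj0, hpj1, hlpj⟩ := hF1 j (by omega) h2
    obtain ⟨hpk0, hpk1, hlpk⟩ := hF1 (2*j - i) hk0 h3
    have hmod : PySem.Int.mod (i + (2*j - i)) 2 = 0 :=
      (PySem.Int.mod_eq_zero_iff_dvd _ 2).mpr ⟨j, by ring⟩
    have hdiv : PySem.Int.floordiv (i + (2*j - i)) 2 = j :=
      (PySem.Int.floordiv_eq_iff_of_pos (by omega)).mpr ⟨by omega, by omega⟩
    rcases hcond with ⟨hc1, hc2⟩ | ⟨hc1, hc2⟩
    · -- positions decreasing: a = p[k], c = p[i]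
      refine ⟨pvAt (pvBuildP l n) (2*j - i), pvAt (pvBuildP l n) i, hpk0, by omega, hpi1, ?_⟩
      rw [hlpk, hlpi]
      rw [show (2*j - i) + i = i + (2*j - i) by ring, hmod, hdiv]
      exact ⟨rfl, hc2, hc1⟩
    · -- positions increasing: a = p[i], c = p[k]
      refine ⟨pvAt (pvBuildP l n) i, pvAt (pvBuildP l n) (2*j - i), hpi0, by omega, hpk1, ?_⟩
      rw [hlpi, hlpk, hmod, hdiv]
      exact ⟨rfl, hc2, hc1⟩
  · rintro ⟨a, c, h0, h1, h2, hmod, hlt1, hlt2⟩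
    obtain ⟨⟨hx0, hx1⟩, hpx⟩ := hF2 a h0 (by omega)
    obtain ⟨⟨hy0, hy1⟩, hpy⟩ := hF2 c (by omega) h2
    set x := pvAt l a with hxdef
    set y := pvAt l c with hydef
    set m := PySem.Int.floordiv (x + y) 2 with hmdef
    have hsum : m * 2 = x + y := by
      have := PySem.Int.floordiv_mul_add_mod (x + y) 2
      rw [← hmdef] at this; omega
    have hxy : x ≠ y := by
      intro h
      rw [h] at hpx
      rw [hpx] at hpy
      omega
    rcases lt_or_gt_of_ne hxy with hlt | hgt
    · -- x < y : triple (x, m, y), increasing positions a < p[m] < c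
      refine ⟨x, m, hx0, by omega, by omega, by omega, Or.inr ?_⟩
      have hky : 2*m - x = y := by omega
      rw [hky, hpx, hpy]
      exact ⟨hlt2, hlt1⟩
    · -- y < x : triple (y, m, x), decreasing positions c > p[m] > a
      refine ⟨y, m, hy0, by omega, by omega, by omega, Or.inl ?_⟩
      have hkx : 2*m - y = x := by omega
      rw [hkx, hpx, hpy]
      exact ⟨hlt2, hlt1⟩

-- ===== VERDICT (by name: the statement is the Claim_ definition above) =====
-- reading l only below index n, l may be replaced by l.take n.toNat
lemma pvTake_at (l : List Int) (n a : Int) (hl : n ≤ (l.length : Int))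
    (h0 : 0 ≤ a) (h1 : a < n) : pvAt l a = pvAt (l.take n.toNat) a := by
  unfold pvAt
  rw [PySem.List.pyGetD_eq_getElem _ _ h0 (by omega),
      PySem.List.pyGetD_eq_getElem _ _ h0 (by rw [List.length_take]; push_cast; omega)]
  rw [List.getElem_take]

lemma pvBuildP_take (l : List Int) (n : Int) (hl : n ≤ (l.length : Int)) :
    pvBuildP l n = pvBuildP (l.take n.toNat) n := by
  rw [pvBuildP_eq, pvBuildP_eq]
  apply PySem.List.foldl_congr_mem
  intro p t ht
  have htn : t < n.toNat := List.mem_range.mp ht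
  rw [List.getD_eq_getElem l 0 (by omega),
      List.getD_eq_getElem (l.take n.toNat) 0 (by rw [List.length_take]; omega),
      List.getElem_take]

theorem check_spec : Claim_equal_check := by
  intro l n _hdom hpre
  unfold Spec_check
  by_cases hn : n ≤ 0
  · unfold check check_alt
    rw [PySem.List.pyRange_one_eq_nil (b := n - 2) (by omega),
        PySem.List.pyRange_one_eq_nil (b := n) (by omega)]
    rfl
  rcases hpre with hn' | ⟨hlen, hall⟩
  · omega
  have hLlen : (l.take n.toNat).length = n.toNat := by rw [List.length_take]; omega
  have hpre' : n = ((l.take n.toNat).length : Int) ∧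
      ∀ v ∈ List.range (l.take n.toNat).length, ((v : Int) ∈ l.take n.toNat) := by
    refine ⟨by rw [hLlen]; omega, ?_⟩
    rw [hLlen]; exact hall
  have hPB := pvBuildP_take l n hlen
  have hExB :
      (∃ a c : Int, 0 ≤ a ∧ a + 1 ≤ c ∧ c < n ∧
          PySem.Int.mod (pvAt l a + pvAt l c) 2 = 0 ∧
          a < pvAt (pvBuildP (l.take n.toNat) n) (PySem.Int.floordiv (pvAt l a + pvAt l c) 2) ∧
          pvAt (pvBuildP (l.take n.toNat) n) (PySem.Int.floordiv (pvAt l a + pvAt l c) 2) < c) ↔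
      (∃ a c : Int, 0 ≤ a ∧ a + 1 ≤ c ∧ c < n ∧
          PySem.Int.mod (pvAt (l.take n.toNat) a + pvAt (l.take n.toNat) c) 2 = 0 ∧
          a < pvAt (pvBuildP (l.take n.toNat) n)
            (PySem.Int.floordiv (pvAt (l.take n.toNat) a + pvAt (l.take n.toNat) c) 2) ∧
          pvAt (pvBuildP (l.take n.toNat) n)
            (PySem.Int.floordiv (pvAt (l.take n.toNat) a + pvAt (l.take n.toNat) c) 2) < c) := by
    constructor
    · rintro ⟨a, c, h0, h1, h2, h3, h4, h5⟩
      rw [pvTake_at l n a hlen h0 (by omega), pvTake_at l n c hlen (by omega) h2] at h3 h4 h5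
      exact ⟨a, c, h0, h1, h2, h3, h4, h5⟩
    · rintro ⟨a, c, h0, h1, h2, h3, h4, h5⟩
      rw [← pvTake_at l n a hlen h0 (by omega), ← pvTake_at l n c hlen (by omega) h2] at h3 h4 h5
      exact ⟨a, c, h0, h1, h2, h3, h4, h5⟩
  have hiff : (check l n = false ↔ check_alt l n = false) := by
    rw [pvCheckA_false_iff, pvCheckAlt_false_iff, hPB]
    exact (pvBridge (l.take n.toNat) n hpre').trans hExB.symm
  cases hA : check l n <;> cases hB : check_alt l n
  · rfl
  · exact absurd (hiff.mp hA) (by simp [hB])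
  · exact absurd (hiff.mpr hB) (by simp [hA])
  · rfl
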